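-- pv_equiv track=rewrite | github.com/gpu314/QR-Codes | matrix_preamble_finishing.py | version_string
-- ===== SOURCE A (Python) =====
-- def version_string(version: int) -> str:
--     string = bin(version)[2:].zfill(6)
--
--     message = [int(x) for x in (string[::-1].zfill(18))[::-1]]
--
--     # Remove leading 0s
--     while len(message) > 0 and message[0] == 0:
--         message.pop(0)
--
--     generatorPolynomial = [1, 1, 1, 1, 1, 0, 0, 1, 0, 0, 1, 0, 1]
--
--     # Polynomial division
--     while len(message) >= 13:
--         nextMessage = []
--         currentGenerator = generatorPolynomial + [0]*max(0, len(message)-len(generatorPolynomial))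
--         for i in range(len(message)):
--             nextMessage.append(message[i]^currentGenerator[i])
--         message = nextMessage
--         while len(message) > 0 and message[0] == 0:
--             message.pop(0)
--
--     # Left padding with 0s if length less than 12
--     while len(message) < 12:
--         message.insert(0, 0)
--
--     answer = [int(x) for x in string] + message
--     answer = answer[::-1]
--
--     return "".join(str(x) for x in answer)
-- ===== SOURCE B (Python) =====
-- # B: computes the BCH remainder with a 12-bit CRC shift register (LFSR) fed one
-- # message bit at a time, instead of A's list-of-bits long division with
-- # pop/insert/strip passes and full-length XOR sweeps.
-- def version_string(version: int) -> str:
--     string = bin(version)[2:].zfill(6)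
--     r = 0
--     for c in string + '0' * max(0, 18 - len(string)):
--         r = 2 * r + (1 if c == '1' else 0)
--         if r >= 0x1000:
--             r ^= 0x1F25
--     return (string + format(r, '012b'))[::-1]
-- ===== Notes on version B (the rewrite author's own statement) =====
-- stated objective: alternative
-- what changed: A builds an 18-entry list of bit ints and long-divides it with repeated strip/pad passes and full-length elementwise XOR sweeps against a padded generator list; B never materialises the message polynomial: it clocks a single 12-bit CRC shift register (LFSR) once per message bit, reducing on overflow, so the remainder falls out of one uniform left-to-right pass.
import Mathlib
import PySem

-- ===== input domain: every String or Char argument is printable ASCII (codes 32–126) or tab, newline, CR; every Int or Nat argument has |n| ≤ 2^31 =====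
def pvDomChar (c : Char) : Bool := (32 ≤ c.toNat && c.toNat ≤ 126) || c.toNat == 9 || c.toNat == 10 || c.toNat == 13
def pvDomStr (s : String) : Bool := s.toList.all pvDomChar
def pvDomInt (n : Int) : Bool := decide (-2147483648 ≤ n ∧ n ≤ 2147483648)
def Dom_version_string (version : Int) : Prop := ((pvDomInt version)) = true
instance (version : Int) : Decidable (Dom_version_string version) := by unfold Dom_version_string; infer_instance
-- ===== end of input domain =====

-- B computes the BCH remainder with a 12-bit CRC shift register clocked once per
-- message bit, instead of A's list-of-bits long division with strip/pad passes
-- and full-length XOR sweeps (objective: alternative).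

-- Shared helper: bin(n)[2:] for n ≥ 0 (binary digits, MSB first, no leading zeros; bin(0)[2:] = "0").
def pvBinChars (n : Nat) : List Char :=
  if h : n < 2 then [Char.ofNat (48 + n)]
  else pvBinChars (n / 2) ++ [Char.ofNat (48 + n % 2)]
decreasing_by exact Nat.div_lt_self (by omega) (by omega)

-- Shared helper: int(x) for a one-character string x (ValueError → junk 0; inside Pre_ only digits occur).
def pvDigit (c : Char) : Int := (PySem.Int.ofChars? [c]).getD 0

-- ===== PORT A =====
-- 'while len(message) > 0 and message[0] == 0: message.pop(0)'
def pvStripA : List Int → List Int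
  | [] => []
  | x :: t => if x = 0 then pvStripA t else x :: t

def pvGen : List Int := [1, 1, 1, 1, 1, 0, 0, 1, 0, 0, 1, 0, 1]

-- one body of the division loop: build currentGenerator, then the indexed for-loop appending xors
def pvXorStep (message : List Int) : List Int :=
  let currentGenerator := pvGen ++ List.replicate (max 0 ((message.length : Int) - 13)).toNat 0
  (PySem.List.pyRange 0 (message.length : Int) 1).foldl
    (fun nextMessage i =>
      nextMessage ++ [PySem.Int.bxor (PySem.List.pyGetD message i 0) (PySem.List.pyGetD currentGenerator i 0)]) []

-- 'while len(message) >= 13: …' ; fuel = current length suffices: each pass strips the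
-- leading 1^1 = 0 away, so the length strictly decreases (proved below).
def pvDivLoopA : Nat → List Int → List Int
  | 0, message => message
  | fuel + 1, message =>
    if 13 ≤ message.length then pvDivLoopA fuel (pvStripA (pvXorStep message)) else message

-- 'while len(message) < 12: message.insert(0, 0)'
def pvPadA (message : List Int) : List Int :=
  if message.length < 12 then pvPadA (0 :: message) else message
termination_by 12 - message.length
decreasing_by simp; omega

-- bin(version)[2:] : for version < 0 Python's later int(x) on 'b' raises ValueError (outside Pre_).
def pvBinTail (version : Int) : List Char :=
  if version < 0 then 'b' :: pvBinChars version.natAbs else pvBinChars version.toNat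

def version_string (version : Int) : String :=
  let string := PySem.Chars.zfill (pvBinTail version) 6
  let message := ((PySem.Chars.zfill string.reverse 18).reverse).map (fun c => pvDigit c)
  let message := pvStripA message
  let message := pvDivLoopA message.length message
  let message := pvPadA message
  let answer := (string.map (fun c => pvDigit c)) ++ message
  let answer := answer.reverse
  String.ofList (PySem.Chars.join [] (answer.map (fun x => PySem.Int.toChars x)))

-- ===== PORT B =====
-- one clock of the 12-bit shift register: shift the next bit in, reduce on overflow
def pvLfsrStep (r b : Int) : Int :=
  let t := 2 * r + b
  if 4096 ≤ t then PySem.Int.bxor t 7973 else t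

def version_string_alt (version : Int) : String :=
  let string := PySem.Chars.zfill (pvBinTail version) 6
  let bits := string ++ List.replicate (max 0 (18 - (string.length : Int))).toNat '0'
  let r := bits.foldl (fun r c => pvLfsrStep r (if c = '1' then 1 else 0)) 0
  -- format(r, '012b') : exact for r ≥ 0, which always holds for the register
  String.ofList ((string ++ PySem.Chars.zfill (pvBinChars r.toNat) 12).reverse)

-- ===== PRECONDITION & SPEC =====
-- Pre_ excludes version < 0: there Python A raises ValueError (int('b') on bin's 'b' marker).
def Pre_version_string (version : Int) : Prop := 0 ≤ version
instance (version : Int) : Decidable (Pre_version_string version) := by unfold Pre_version_string; infer_instance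
def pvWitness_version_string : Int := (7 : Int)

def Spec_version_string (version : Int) (out : String) : Prop := out = version_string_alt version
instance (version : Int) (out : String) : Decidable (Spec_version_string version out) := by unfold Spec_version_string; infer_instance

-- ===== CLAIM (what is proved, stated in full; the proofs are below) =====
def Claim_equal_version_string : Prop := ∀ (version : Int), Dom_version_string version → Pre_version_string version → Spec_version_string version (version_string version)

-- ===== LEMMAS AND PROOFS =====

def pvVal (l : List Int) : Int := l.foldl (fun a b => 2 * a + b) 0

def pvIsBits (l : List Int) : Prop := ∀ x ∈ l, x = 0 ∨ x = 1

def pvChar (b : Int) : Char := if b = 1 then '1' else '0'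

-- proof-side reference form of the division: top-aligned XOR steps on an integer
def pvDivLoopB : Nat → Int → Int
  | 0, m => m
  | fuel + 1, m =>
    if 13 ≤ PySem.Int.bitLength m then
      pvDivLoopB fuel (PySem.Int.bxor m ((7973 : Int) <<< (PySem.Int.bitLength m - 13)))
    else m

def pvRemB (m : Int) : Int := pvDivLoopB (PySem.Int.bitLength m) m

theorem xor_two_mul_add (a b m n : Nat) (ha : a < 2) (hb : b < 2) :
    (2*m+a) ^^^ (2*n+b) = 2*(m ^^^ n) + (a ^^^ b) := by
  have h := fun (x y : Bool) => Nat.bitwise_bit (f := bne) (h := by simp) x m y n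
  have e11 : Nat.bitwise bne 1 1 = 0 := by
    simpa only [HXor.hXor, XorOp.xor, Nat.xor] using Nat.xor_self 1
  simp only [HXor.hXor, XorOp.xor, Nat.xor] at *
  interval_cases a <;> interval_cases b <;>
    [have := h false false; have := h false true; have := h true false; have := h true true] <;>
    simp [Nat.bit] at this ⊢ <;> omega

theorem pvVal_foldl_acc (l : List Int) (a : Int) :
    l.foldl (fun a b => 2 * a + b) a = a * 2 ^ l.length + pvVal l := by
  induction l generalizing a with
  | nil => simp [pvVal]
  | cons x t ih =>
    simp only [List.foldl_cons, List.length_cons, pvVal]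
    rw [ih (2*a+x), ih (2*0+x)]
    ring

theorem pvVal_cons (x : Int) (t : List Int) : pvVal (x :: t) = x * 2 ^ t.length + pvVal t := by
  have := pvVal_foldl_acc (x :: t) 0
  simp only [List.foldl_cons] at this
  rw [pvVal, List.foldl_cons]
  rw [pvVal_foldl_acc t (2*0+x)]
  ring

theorem pvVal_append_singleton (l : List Int) (x : Int) : pvVal (l ++ [x]) = 2 * pvVal l + x := by
  rw [pvVal, List.foldl_append, List.foldl_cons, List.foldl_nil, ← pvVal]

theorem pvVal_nonneg {l : List Int} (h : pvIsBits l) : 0 ≤ pvVal l := by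
  induction l with
  | nil => simp [pvVal]
  | cons x t ih =>
    rw [pvVal_cons]
    have hx := h x (by simp)
    have ht : pvIsBits t := fun y hy => h y (by simp [hy])
    have := ih ht
    rcases hx with rfl | rfl <;> positivity

theorem pvVal_lt {l : List Int} (h : pvIsBits l) : pvVal l < 2 ^ l.length := by
  induction l with
  | nil => simp [pvVal]
  | cons x t ih =>
    rw [pvVal_cons]
    have hx := h x (by simp)
    have ht : pvIsBits t := fun y hy => h y (by simp [hy])
    have := ih ht
    simp only [List.length_cons, pow_succ]
    rcases hx with rfl | rfl <;> nlinarith [pvVal_nonneg ht]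

theorem pvVal_head_one {t : List Int} (h : pvIsBits t) :
    2 ^ t.length ≤ pvVal ((1 : Int) :: t) := by
  rw [pvVal_cons]
  have := pvVal_nonneg h
  nlinarith

theorem pvVal_append_replicate_zero (l : List Int) (k : Nat) :
    pvVal (l ++ List.replicate k 0) = pvVal l * 2 ^ k := by
  induction k with
  | zero => simp [pvVal]
  | succ k ih =>
    rw [List.replicate_succ', ← List.append_assoc, pvVal_append_singleton, ih, pow_succ]
    ring

theorem pvBinChars_bits (n : Nat) : ∀ c ∈ pvBinChars n, c = '0' ∨ c = '1' := by
  induction n using Nat.strong_induction_on with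
  | _ n ih =>
    rw [pvBinChars]
    split
    · rename_i h
      interval_cases n <;> (intro c hc; simp at hc; subst hc; decide)
    · rename_i h
      intro c hc
      rcases List.mem_append.1 hc with hc | hc
      · exact ih (n / 2) (Nat.div_lt_self (by omega) (by omega)) c hc
      · simp at hc
        have h2 : n % 2 = 0 ∨ n % 2 = 1 := by omega
        rcases h2 with h2 | h2 <;> rw [h2] at hc <;> subst hc <;> decide

theorem pvBinChars_ne_nil (n : Nat) : pvBinChars n ≠ [] := by
  rw [pvBinChars]; split <;> simp

theorem pvBinChars_of_val {l : List Int} (hb : pvIsBits l) (hh : l.head? = some 1) :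
    pvBinChars (pvVal l).toNat = l.map pvChar := by
  induction l using List.reverseRecOn with
  | nil => simp at hh
  | append_singleton l' b ih =>
    have hbbit := hb b (by simp)
    cases l' with
    | nil =>
      simp at hh
      subst hh
      have h1 : (pvVal ([] ++ [(1:Int)])).toNat = 1 := by decide
      rw [h1, pvBinChars]
      decide
    | cons x t =>
      have hx : x = 1 := by simpa using hh
      subst hx
      have hb' : pvIsBits ((1:Int) :: t) := fun z hz => hb z (by simp at hz ⊢; tauto)
      have hh' : ((1:Int) :: t).head? = some 1 := rfl
      have ht : pvIsBits t := fun z hz => hb' z (by simp [hz])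
      have hV1 : 1 ≤ pvVal ((1:Int) :: t) := by
        have h1 := pvVal_head_one ht
        have h2 : (0:Int) < 2 ^ t.length := by positivity
        omega
      set V := pvVal ((1:Int) :: t) with hV
      rw [pvVal_append_singleton]
      have htoNat : (2 * V + b).toNat = 2 * V.toNat + b.toNat := by rcases hbbit with rfl | rfl <;> omega
      rw [htoNat, pvBinChars]
      rw [dif_neg (by rcases hbbit with rfl | rfl <;> omega)]
      have hdiv : (2 * V.toNat + b.toNat) / 2 = V.toNat := by omega
      have hmod : (2 * V.toNat + b.toNat) % 2 = b.toNat := by rcases hbbit with rfl | rfl <;> omega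
      rw [hdiv, hmod, ih hb' hh', List.map_append]
      congr 1
      rcases hbbit with rfl | rfl <;> decide

theorem zfill_digits (cs : List Char) (w : Int) (hne : cs ≠ [])
    (h : ∀ c ∈ cs, c = '0' ∨ c = '1') :
    PySem.Chars.zfill cs w = List.replicate (w.toNat - cs.length) '0' ++ cs := by
  rw [PySem.Chars.zfill.eq_def]
  split
  · rename_i hw
    have : w.toNat - cs.length = 0 := by omega
    simp [this]
  · rename_i hw
    cases cs with
    | nil => exact absurd rfl hne
    | cons c rest =>
      have hc := h c (by simp)
      split
      · rename_i c2 rest2 heq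
        injection heq with h1 h2
        subst h1; subst h2
        split
        · rename_i hsign
          rcases hc with rfl | rfl <;> rcases hsign with h' | h' <;> simp at h'
        · rfl
      · rename_i heq
        simp at heq

theorem pvStripA_val (l : List Int) : pvVal (pvStripA l) = pvVal l := by
  induction l with
  | nil => rfl
  | cons x t ih =>
    rw [pvStripA]
    split
    · rename_i hx
      rw [ih, hx, pvVal_cons]; ring
    · rfl

theorem pvStripA_bits {l : List Int} (h : pvIsBits l) : pvIsBits (pvStripA l) := by
  induction l with
  | nil => exact h
  | cons x t ih =>
    rw [pvStripA]
    split
    · exact ih (fun y hy => h y (by simp [hy]))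
    · exact h

theorem pvStripA_head {l : List Int} (h : pvIsBits l) :
    pvStripA l = [] ∨ (pvStripA l).head? = some 1 := by
  induction l with
  | nil => exact Or.inl rfl
  | cons x t ih =>
    rw [pvStripA]
    split
    · exact ih (fun y hy => h y (by simp [hy]))
    · rename_i hx
      right
      rcases h x (by simp) with rfl | rfl
      · exact absurd rfl hx
      · rfl

theorem pvStripA_length_le (l : List Int) : (pvStripA l).length ≤ l.length := by
  induction l with
  | nil => simp [pvStripA]
  | cons x t ih =>
    rw [pvStripA]
    split
    · simp; omega
    · simp

theorem pvBitLength_val {l : List Int} (hb : pvIsBits l) (hh : l = [] ∨ l.head? = some 1) :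
    PySem.Int.bitLength (pvVal l) = l.length := by
  rcases hh with rfl | hh
  · decide
  · obtain ⟨x, t, rfl⟩ : ∃ x t, l = x :: t := by
      cases l with
      | nil => simp at hh
      | cons x t => exact ⟨x, t, rfl⟩
    have hx : x = 1 := by simpa using hh
    subst hx
    have ht : pvIsBits t := fun y hy => hb y (by simp [hy])
    have hlo : 2 ^ t.length ≤ pvVal (1 :: t) := pvVal_head_one ht
    have hhi : pvVal (1 :: t) < 2 ^ (t.length + 1) := by
      simpa using pvVal_lt (l := 1 :: t) hb
    set v := pvVal (1 :: t) with hv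
    have hvpos : 0 < v := lt_of_lt_of_le (by positivity) hlo
    have hne : v ≠ 0 := by omega
    have h1 := PySem.Int.lt_two_pow_bitLength v
    have h2 := PySem.Int.two_pow_bitLength_le v hne
    have habs : v.natAbs = v.toNat := by omega
    rw [habs] at h1 h2
    set B := PySem.Int.bitLength v with hB
    have hlo' : (2:Nat) ^ t.length ≤ v.toNat := by
      have h' : (((2:Nat) ^ t.length : Nat) : Int) ≤ v := by push_cast; exact hlo
      omega
    have hhi' : v.toNat < 2 ^ (t.length + 1) := by
      have h' : v < (((2:Nat) ^ (t.length + 1) : Nat) : Int) := by push_cast; exact hhi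
      omega
    have hB1 : 1 ≤ B := by
      by_contra hc
      have : B = 0 := by omega
      rw [this] at h1
      have : (2:Nat) ^ t.length ≥ 1 := Nat.one_le_two_pow
      omega
    have e1 : t.length < B := by
      have : (2:Nat) ^ t.length < 2 ^ B := lt_of_le_of_lt hlo' h1
      exact (Nat.pow_lt_pow_iff_right (by omega)).1 this
    have e2 : B - 1 < t.length + 1 := by
      have : (2:Nat) ^ (B-1) < 2 ^ (t.length + 1) := lt_of_le_of_lt h2 hhi'
      exact (Nat.pow_lt_pow_iff_right (by omega)).1 this
    simp only [List.length_cons]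
    omega

theorem pvXorStep_eq_zipWith (l : List Int) (h : 13 ≤ l.length) :
    pvXorStep l = List.zipWith PySem.Int.bxor l (pvGen ++ List.replicate (l.length - 13) 0) := by
  have hmax : (max 0 ((l.length : Int) - 13)).toNat = l.length - 13 := by omega
  simp only [pvXorStep, hmax]
  rw [PySem.List.foldl_append_singleton_eq_map, List.nil_append]
  apply List.ext_getElem
  · simp [PySem.List.length_pyRange_one, pvGen]
    omega
  · intro i h1 h2
    have hi : i < l.length := by
      simpa [PySem.List.length_pyRange_one] using h1
    have hglen : (pvGen ++ List.replicate (l.length - 13) (0:Int)).length = l.length := by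
      simp [pvGen]; omega
    rw [List.getElem_map, PySem.List.getElem_pyRange_one, List.getElem_zipWith]
    have e1 : PySem.List.pyGetD l ((0:Int) + (i:Int)) 0 = l[i] := by
      rw [zero_add, PySem.List.pyGetD_natCast]
      simp [List.getD, hi]
    have e2 : PySem.List.pyGetD (pvGen ++ List.replicate (l.length - 13) (0:Int)) ((0:Int) + (i:Int)) 0
        = (pvGen ++ List.replicate (l.length - 13) (0:Int))[i]'(by omega) := by
      rw [zero_add, PySem.List.pyGetD_natCast]
      have hlt : i < (pvGen ++ List.replicate (l.length - 13) (0:Int)).length := by omega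
      simp [List.getD, List.getElem?_eq_getElem hlt]
    rw [e1, e2]

theorem pvBxor_two_mul_nat (un vn a b : Nat) (ha : a < 2) (hb : b < 2) :
    PySem.Int.bxor (2 * (un:Int) + (a:Int)) (2 * (vn:Int) + (b:Int)) =
      2 * PySem.Int.bxor (un:Int) (vn:Int) + PySem.Int.bxor (a:Int) (b:Int) := by
  have h1 : (2 * (un:Int) + (a:Int)) = ((2*un+a : Nat) : Int) := by push_cast; ring
  have h2 : (2 * (vn:Int) + (b:Int)) = ((2*vn+b : Nat) : Int) := by push_cast; ring
  rw [h1, h2, PySem.Int.bxor_natCast, PySem.Int.bxor_natCast, PySem.Int.bxor_natCast,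
    xor_two_mul_add a b un vn ha hb]
  push_cast
  ring

theorem pvBxor_two_mul (u v x y : Int) (hu : 0 ≤ u) (hv : 0 ≤ v)
    (hx : x = 0 ∨ x = 1) (hy : y = 0 ∨ y = 1) :
    PySem.Int.bxor (2 * u + x) (2 * v + y) = 2 * PySem.Int.bxor u v + PySem.Int.bxor x y := by
  obtain ⟨un, rfl⟩ := Int.eq_ofNat_of_zero_le hu
  obtain ⟨vn, rfl⟩ := Int.eq_ofNat_of_zero_le hv
  rcases hx with rfl | rfl <;> rcases hy with rfl | rfl
  · simpa using pvBxor_two_mul_nat un vn 0 0 (by omega) (by omega)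
  · simpa using pvBxor_two_mul_nat un vn 0 1 (by omega) (by omega)
  · simpa using pvBxor_two_mul_nat un vn 1 0 (by omega) (by omega)
  · simpa using pvBxor_two_mul_nat un vn 1 1 (by omega) (by omega)

theorem pvVal_zipWith_bxor {a b : List Int} (ha : pvIsBits a) (hb : pvIsBits b)
    (hlen : a.length = b.length) :
    pvVal (List.zipWith PySem.Int.bxor a b) = PySem.Int.bxor (pvVal a) (pvVal b) := by
  induction a using List.reverseRecOn generalizing b with
  | nil =>
    cases b with
    | nil => decide
    | cons y t => simp at hlen
  | append_singleton a' x ih =>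
    rcases List.eq_nil_or_concat b with rfl | ⟨b', y, rfl⟩
    · simp at hlen
    · rw [List.concat_eq_append] at hb hlen ⊢
      have hlen' : a'.length = b'.length := by simp at hlen; omega
      rw [List.zipWith_append hlen']
      simp only [List.zipWith_cons_cons, List.zipWith_nil_right]
      have ha' : pvIsBits a' := fun z hz => ha z (by simp [hz])
      have hb' : pvIsBits b' := fun z hz => hb z (by simp [hz])
      rw [pvVal_append_singleton, pvVal_append_singleton, pvVal_append_singleton,
        ih ha' hb' hlen',
        pvBxor_two_mul (pvVal a') (pvVal b') x y (pvVal_nonneg ha') (pvVal_nonneg hb')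
          (ha x (by simp)) (hb y (by simp))]

theorem pvBits_zipWith_bxor {a b : List Int} (ha : pvIsBits a) (hb : pvIsBits b) :
    pvIsBits (List.zipWith PySem.Int.bxor a b) := by
  induction a generalizing b with
  | nil => intro z hz; simp at hz
  | cons x t ih =>
    cases b with
    | nil => intro z hz; simp at hz
    | cons y u =>
      intro z hz
      simp only [List.zipWith_cons_cons, List.mem_cons] at hz
      rcases hz with rfl | hz
      · rcases ha x (by simp) with rfl | rfl <;> rcases hb y (by simp) with rfl | rfl <;>
          [left; right; right; left] <;> decide
      · exact ih (fun w hw => ha w (by simp [hw])) (fun w hw => hb w (by simp [hw])) z hz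

theorem pvGen_padded_val (k : Nat) :
    pvVal (pvGen ++ List.replicate k 0) = (7973 : Int) <<< k := by
  rw [pvVal_append_replicate_zero, Int.shiftLeft_eq]
  have : pvVal pvGen = 7973 := by decide
  rw [this]

theorem pvLoop_corr : ∀ (fuel : Nat) (l : List Int), pvIsBits l → (l = [] ∨ l.head? = some 1) →
    l.length ≤ fuel →
    pvIsBits (pvDivLoopA fuel l) ∧ (pvDivLoopA fuel l = [] ∨ (pvDivLoopA fuel l).head? = some 1) ∧
    (pvDivLoopA fuel l).length ≤ 12 ∧
    pvVal (pvDivLoopA fuel l) = pvDivLoopB fuel (pvVal l) := by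
  intro fuel
  induction fuel with
  | zero =>
    intro l hb hh hlen
    have hnil : l = [] := List.eq_nil_of_length_eq_zero (by omega)
    subst hnil
    exact ⟨hb, Or.inl rfl, by simp [pvDivLoopA], by decide⟩
  | succ fuel ih =>
    intro l hb hh hlen
    have hBL : PySem.Int.bitLength (pvVal l) = l.length := pvBitLength_val hb hh
    rw [pvDivLoopA, pvDivLoopB, hBL]
    by_cases hc : 13 ≤ l.length
    · rw [if_pos hc, if_pos (by omega)]
      have hh1 : l.head? = some 1 := by
        rcases hh with rfl | hh
        · simp at hc
        · exact hh
      obtain ⟨t, rfl⟩ : ∃ t, l = (1:Int) :: t := by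
        cases l with
        | nil => simp at hh1
        | cons x t => exact ⟨t, by simpa using hh1⟩
      have hc' : 13 ≤ t.length + 1 := by simpa using hc
      have hlen1 : t.length + 1 ≤ fuel + 1 := by simpa using hlen
      rw [pvXorStep_eq_zipWith _ hc]
      have hkk : ((1:Int) :: t).length - 13 = t.length + 1 - 13 := by simp
      rw [hkk]
      set k := t.length + 1 - 13 with hk
      set g : List Int := pvGen ++ List.replicate k 0 with hg
      have hglen : g.length = ((1:Int) :: t).length := by
        rw [hg]
        simp [pvGen]
        omega
      have hgbits : pvIsBits g := by
        intro z hz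
        rcases List.mem_append.1 hz with hz | hz
        · simp [pvGen] at hz
          tauto
        · left
          simpa using List.eq_of_mem_replicate hz
      have hgdef : g = (1:Int) :: ([1,1,1,1,0,0,1,0,0,1,0,1] ++ List.replicate k 0) := by
        simp [hg, pvGen]
      have hzipval : pvVal (List.zipWith PySem.Int.bxor ((1:Int) :: t) g)
          = PySem.Int.bxor (pvVal ((1:Int) :: t)) ((7973 : Int) <<< k) := by
        rw [pvVal_zipWith_bxor hb hgbits hglen.symm, hg, pvGen_padded_val]
      have hzipbits := pvBits_zipWith_bxor (b := g) hb hgbits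
      have hzhead : List.zipWith PySem.Int.bxor ((1:Int) :: t) g
          = (0:Int) :: List.zipWith PySem.Int.bxor t ([1,1,1,1,0,0,1,0,0,1,0,1] ++ List.replicate k 0) := by
        rw [hgdef]
        simp only [List.zipWith_cons_cons]
        rw [show PySem.Int.bxor 1 1 = 0 from by decide]
      set l' := pvStripA (List.zipWith PySem.Int.bxor ((1:Int) :: t) g) with hl'
      have hbits' : pvIsBits l' := pvStripA_bits hzipbits
      have hhead' := pvStripA_head hzipbits
      have hval' : pvVal l' = PySem.Int.bxor (pvVal ((1:Int) :: t)) ((7973 : Int) <<< k) := by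
        rw [hl', pvStripA_val, hzipval]
      have hlen' : l'.length ≤ fuel := by
        have h1 : l'.length ≤ (List.zipWith PySem.Int.bxor t ([1,1,1,1,0,0,1,0,0,1,0,1] ++ List.replicate k 0)).length := by
          rw [hl', hzhead, pvStripA]
          rw [if_pos rfl]
          exact pvStripA_length_le _
        have h2 : (List.zipWith PySem.Int.bxor t ([1,1,1,1,0,0,1,0,0,1,0,1] ++ List.replicate k 0)).length ≤ t.length := by
          simp
        omega
      have hkeq : ((1:Int) :: t).length - 13 = k := hkk
      have := ih l' hbits' hhead' hlen'
      rw [hval'] at this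
      simpa [hkeq] using this
    · rw [if_neg hc, if_neg (by omega)]
      exact ⟨hb, hh, by omega, rfl⟩

theorem pvPadA_eq (l : List Int) : pvPadA l = List.replicate (12 - l.length) 0 ++ l := by
  fun_induction pvPadA l with
  | case1 l hlt ih =>
    rw [ih]
    have : 12 - l.length = (12 - (0 :: l).length) + 1 := by simp; omega
    rw [this, List.replicate_succ', List.append_assoc]
    simp
  | case2 l hlt =>
    have : 12 - l.length = 0 := by omega
    simp [this]

theorem pvJoin_toChars {l : List Int} (h : pvIsBits l) :
    PySem.Chars.join [] (l.map (fun x => PySem.Int.toChars x)) = l.map pvChar := by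
  have e : l.map (fun x => PySem.Int.toChars x) = (l.map pvChar).map (fun c => [c]) := by
    rw [List.map_map]
    apply List.map_congr_left
    intro x hx
    rcases h x hx with rfl | rfl <;> decide
  rw [e, PySem.Chars.join_nil_singletons]

theorem pvChar_pvDigit {c : Char} (h : c = '0' ∨ c = '1') : pvChar (pvDigit c) = c := by
  rcases h with rfl | rfl <;> decide

-- ==== bridge: the B-side shift register computes the same remainder ====

theorem pvDivLoopB_small (f : Nat) (m : Int) (h : PySem.Int.bitLength m < 13) :
    pvDivLoopB f m = m := by
  cases f with
  | zero => rfl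
  | succ f => rw [pvDivLoopB, if_neg (by omega)]

theorem pvBitLength_le {mn k : Nat} (h : mn < 2 ^ k) : PySem.Int.bitLength (mn : Int) ≤ k := by
  by_cases h0 : mn = 0
  · subst h0; simp [PySem.Int.bitLength_zero]
  · by_contra hc
    have h2 := PySem.Int.two_pow_bitLength_le (mn : Int) (by exact_mod_cast h0)
    rw [Int.natAbs_natCast] at h2
    have : (2:Nat) ^ k ≤ 2 ^ (PySem.Int.bitLength (mn:Int) - 1) :=
      Nat.pow_le_pow_right (by omega) (by omega)
    omega

theorem pvBitLength_gt {mn k : Nat} (h : 2 ^ k ≤ mn) : k < PySem.Int.bitLength (mn : Int) := by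
  have h1 := PySem.Int.lt_two_pow_bitLength (mn : Int)
  rw [Int.natAbs_natCast] at h1
  have : (2:Nat) ^ k < 2 ^ (PySem.Int.bitLength (mn:Int)) := by omega
  exact (Nat.pow_lt_pow_iff_right (by omega)).1 this

theorem pvXorTop {k a b : Nat} (ha1 : 2 ^ k ≤ a) (ha2 : a < 2 ^ (k+1))
    (hb1 : 2 ^ k ≤ b) (hb2 : b < 2 ^ (k+1)) : a ^^^ b < 2 ^ k := by
  apply Nat.lt_pow_two_of_testBit
  intro i hi
  rw [Nat.testBit_xor]
  rcases eq_or_lt_of_le hi with rfl | hlt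
  · rw [Nat.testBit_of_two_pow_le_and_two_pow_add_one_gt ha1 ha2,
      Nat.testBit_of_two_pow_le_and_two_pow_add_one_gt hb1 hb2]
    rfl
  · have hp : (2:Nat) ^ (k+1) ≤ 2 ^ i := Nat.pow_le_pow_right (by omega) (by omega)
    rw [Nat.testBit_lt_two_pow (by omega), Nat.testBit_lt_two_pow (by omega)]
    rfl

theorem pvStepB (mn : Nat) (h13 : 13 ≤ PySem.Int.bitLength (mn : Int)) :
    PySem.Int.bxor (mn : Int) ((7973 : Int) <<< (PySem.Int.bitLength (mn : Int) - 13))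
      = ((mn ^^^ 7973 * 2 ^ (PySem.Int.bitLength (mn : Int) - 13) : Nat) : Int) ∧
    PySem.Int.bitLength (((mn ^^^ 7973 * 2 ^ (PySem.Int.bitLength (mn : Int) - 13) : Nat)) : Int)
      < PySem.Int.bitLength (mn : Int) := by
  set bl := PySem.Int.bitLength (mn : Int) with hbl
  have hcast : (7973 : Int) <<< (bl - 13) = ((7973 * 2 ^ (bl - 13) : Nat) : Int) := by
    rw [Int.shiftLeft_eq]; push_cast; ring
  have hne : mn ≠ 0 := by
    intro h0; subst h0
    rw [show PySem.Int.bitLength ((0:Nat):Int) = 0 from PySem.Int.bitLength_zero] at hbl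
    omega
  have hlo : 2 ^ (bl - 1) ≤ mn := by
    have := PySem.Int.two_pow_bitLength_le (mn : Int) (by exact_mod_cast hne)
    rwa [Int.natAbs_natCast] at this
  have hhi : mn < 2 ^ bl := by
    have := PySem.Int.lt_two_pow_bitLength (mn : Int)
    rwa [Int.natAbs_natCast] at this
  have hglo : 2 ^ (bl - 1) ≤ 7973 * 2 ^ (bl - 13) := by
    have : (2:Nat) ^ (bl - 1) = 2 ^ 12 * 2 ^ (bl - 13) := by
      rw [← pow_add]; congr 1; omega
    rw [this]
    exact Nat.mul_le_mul_right _ (by norm_num)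
  have hghi : 7973 * 2 ^ (bl - 13) < 2 ^ bl := by
    have : (2:Nat) ^ bl = 2 ^ 13 * 2 ^ (bl - 13) := by
      rw [← pow_add]; congr 1; omega
    rw [this]
    exact (Nat.mul_lt_mul_right (by positivity)).mpr (by norm_num)
  have he : (2:Nat) ^ (bl - 1 + 1) = 2 ^ bl := by congr 1; omega
  have hxor : mn ^^^ 7973 * 2 ^ (bl - 13) < 2 ^ (bl - 1) :=
    pvXorTop hlo (by omega) hglo (by omega)
  refine ⟨by rw [hcast, PySem.Int.bxor_natCast], ?_⟩
  have := pvBitLength_le hxor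
  omega

theorem pvDivLoopB_fuel2 : ∀ (f1 f2 : Nat) (m : Int), 0 ≤ m →
    PySem.Int.bitLength m ≤ f1 → PySem.Int.bitLength m ≤ f2 →
    pvDivLoopB f1 m = pvDivLoopB f2 m := by
  intro f1
  induction f1 with
  | zero =>
    intro f2 m hm h1 h2
    rw [pvDivLoopB, pvDivLoopB_small f2 m (by omega)]
  | succ f1 ih =>
    intro f2 m hm h1 h2
    by_cases hc : 13 ≤ PySem.Int.bitLength m
    · obtain ⟨f2', rfl⟩ : ∃ f2', f2 = f2' + 1 := ⟨f2 - 1, by omega⟩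
      rw [pvDivLoopB, pvDivLoopB, if_pos hc, if_pos hc]
      obtain ⟨mn, rfl⟩ := Int.eq_ofNat_of_zero_le hm
      obtain ⟨hcast, hdec⟩ := pvStepB mn hc
      rw [hcast]
      exact ih f2' _ (by positivity) (by omega) (by omega)
    · rw [pvDivLoopB_small _ _ (by omega), pvDivLoopB_small _ _ (by omega)]

theorem pvDivLoopB_eq_rem (f : Nat) (m : Int) (hm : 0 ≤ m)
    (hf : PySem.Int.bitLength m ≤ f) : pvDivLoopB f m = pvRemB m :=
  pvDivLoopB_fuel2 f (PySem.Int.bitLength m) m hm hf le_rfl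

theorem pvRemB_small (m : Int) (h : PySem.Int.bitLength m < 13) : pvRemB m = m := by
  rw [pvRemB]; exact pvDivLoopB_small _ _ h

theorem pvRemB_unfold (m : Int) (hm : 0 ≤ m) (hc : 13 ≤ PySem.Int.bitLength m) :
    pvRemB m = pvRemB (PySem.Int.bxor m ((7973 : Int) <<< (PySem.Int.bitLength m - 13))) := by
  obtain ⟨mn, rfl⟩ := Int.eq_ofNat_of_zero_le hm
  obtain ⟨hcast, hdec⟩ := pvStepB mn hc
  obtain ⟨f, hf⟩ : ∃ f, PySem.Int.bitLength ((mn:Nat) : Int) = f + 1 :=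
    ⟨PySem.Int.bitLength ((mn:Nat) : Int) - 1, by omega⟩
  rw [hf] at hcast hdec
  rw [pvRemB, hf, pvDivLoopB, if_pos hc, hf, hcast,
    pvDivLoopB_eq_rem f _ (by positivity) (by omega)]

theorem pvIntBit (bn : Nat) (h : bn < 2) : ((bn : Nat) : Int) = 0 ∨ ((bn : Nat) : Int) = 1 := by
  omega

theorem pvRemB_step_small (mn bn : Nat) (hbn : bn < 2)
    (h : PySem.Int.bitLength ((mn:Nat) : Int) < 13) :
    pvRemB (2 * ((mn:Nat):Int) + ((bn:Nat):Int)) = pvLfsrStep (pvRemB ((mn:Nat):Int)) ((bn:Nat):Int) := by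
  have hmn : mn < 2 ^ 12 := by
    have h1 := PySem.Int.lt_two_pow_bitLength ((mn:Nat) : Int)
    rw [Int.natAbs_natCast] at h1
    have : (2:Nat) ^ (PySem.Int.bitLength ((mn:Nat):Int)) ≤ 2 ^ 12 :=
      Nat.pow_le_pow_right (by omega) (by omega)
    omega
  rw [pvRemB_small _ h]
  simp only [pvLfsrStep]
  have hc2 : 2 * ((mn:Nat):Int) + ((bn:Nat):Int) = ((2*mn+bn : Nat) : Int) := by push_cast; ring
  rw [hc2]
  by_cases hcN : 2 ^ 12 ≤ 2*mn+bn
  · have hlt : 2*mn+bn < 2 ^ 13 := by omega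
    have hbl13 : PySem.Int.bitLength ((2*mn+bn : Nat) : Int) = 13 := by
      have := pvBitLength_gt (mn := 2*mn+bn) (k := 12) hcN
      have := pvBitLength_le (mn := 2*mn+bn) (k := 13) hlt
      omega
    obtain ⟨hcast, hdec⟩ := pvStepB (2*mn+bn) (by omega)
    rw [hbl13] at hcast hdec
    have hsh : (7973 : Int) <<< ((13:Nat) - 13) = 7973 := by decide
    rw [hsh] at hcast
    rw [pvRemB_unfold _ (by positivity) (by omega), hbl13, hsh, hcast,
      pvRemB_small _ (by omega), ← hcast,
      if_pos (show (4096:Int) ≤ ((2*mn+bn : Nat):Int) by exact_mod_cast hcN)]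
  · have hlt : 2*mn+bn < 2 ^ 12 := by omega
    rw [pvRemB_small _ (by have := pvBitLength_le hlt; omega),
      if_neg (show ¬ (4096:Int) ≤ ((2*mn+bn : Nat):Int) by exact_mod_cast hcN)]

theorem pvRemB_step : ∀ (n : Nat) (m b : Int), PySem.Int.bitLength m ≤ n → 0 ≤ m →
    (b = 0 ∨ b = 1) → pvRemB (2*m+b) = pvLfsrStep (pvRemB m) b := by
  intro n
  induction n with
  | zero =>
    intro m b hn hm hb
    obtain ⟨mn, rfl⟩ := Int.eq_ofNat_of_zero_le hm
    obtain ⟨bn, rfl, hbn2⟩ : ∃ bn : Nat, b = (bn : Int) ∧ bn < 2 := by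
      rcases hb with rfl | rfl
      · exact ⟨0, by simp, by omega⟩
      · exact ⟨1, by simp, by omega⟩
    exact pvRemB_step_small mn bn hbn2 (by omega)
  | succ n ih =>
    intro m b hn hm hb
    by_cases hc : 13 ≤ PySem.Int.bitLength m
    · obtain ⟨mn, rfl⟩ := Int.eq_ofNat_of_zero_le hm
      obtain ⟨bn, rfl, hbn2⟩ : ∃ bn : Nat, b = (bn : Int) ∧ bn < 2 := by
        rcases hb with rfl | rfl
        · exact ⟨0, by simp, by omega⟩
        · exact ⟨1, by simp, by omega⟩
      have hne : mn ≠ 0 := by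
        intro h0; subst h0
        rw [show PySem.Int.bitLength ((0:Nat):Int) = 0 from PySem.Int.bitLength_zero] at hc
        omega
      have hlo : 2 ^ (PySem.Int.bitLength ((mn:Nat):Int) - 1) ≤ mn := by
        have := PySem.Int.two_pow_bitLength_le ((mn:Nat) : Int) (by exact_mod_cast hne)
        rwa [Int.natAbs_natCast] at this
      have hhi : mn < 2 ^ PySem.Int.bitLength ((mn:Nat):Int) := by
        have := PySem.Int.lt_two_pow_bitLength ((mn:Nat) : Int)
        rwa [Int.natAbs_natCast] at this
      have hc2 : 2 * ((mn:Nat):Int) + ((bn:Nat):Int) = ((2*mn+bn : Nat) : Int) := by push_cast; ring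
      have hpow : (2:Nat) ^ PySem.Int.bitLength ((mn:Nat):Int)
          = 2 * 2 ^ (PySem.Int.bitLength ((mn:Nat):Int) - 1) := by
        rw [← pow_succ']; congr 1; omega
      have hge : 2 ^ PySem.Int.bitLength ((mn:Nat):Int) ≤ 2*mn+bn := by omega
      have hlt : 2*mn+bn < 2 ^ (PySem.Int.bitLength ((mn:Nat):Int) + 1) := by
        rw [pow_succ]; omega
      have hbl2 : PySem.Int.bitLength ((2*mn+bn : Nat) : Int)
          = PySem.Int.bitLength ((mn:Nat):Int) + 1 := by
        have := pvBitLength_gt (mn := 2*mn+bn) hge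
        have := pvBitLength_le (mn := 2*mn+bn) hlt
        omega
      obtain ⟨hcast, hdec⟩ := pvStepB mn hc
      rw [hc2, pvRemB_unfold _ (by positivity) (by omega), hbl2, ← hc2]
      have hshd : (7973 : Int) <<< (PySem.Int.bitLength ((mn:Nat):Int) + 1 - 13)
          = 2 * ((7973 : Int) <<< (PySem.Int.bitLength ((mn:Nat):Int) - 13)) + 0 := by
        rw [Int.shiftLeft_eq, Int.shiftLeft_eq]
        have : (2:Int) ^ (PySem.Int.bitLength ((mn:Nat):Int) + 1 - 13)
            = 2 * 2 ^ (PySem.Int.bitLength ((mn:Nat):Int) - 13) := by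
          rw [← pow_succ']; congr 1; omega
        rw [this]; ring
      have hvpos : (0:Int) ≤ (7973 : Int) <<< (PySem.Int.bitLength ((mn:Nat):Int) - 13) := by
        rw [Int.shiftLeft_eq]; positivity
      rw [hshd,
        pvBxor_two_mul ((mn:Nat):Int) ((7973 : Int) <<< (PySem.Int.bitLength ((mn:Nat):Int) - 13))
          ((bn:Nat):Int) 0 (by positivity) hvpos (pvIntBit bn hbn2) (Or.inl rfl)]
      have hx0 : PySem.Int.bxor ((bn:Nat):Int) 0 = ((bn:Nat):Int) := by
        rw [show (0:Int) = ((0:Nat):Int) from rfl, PySem.Int.bxor_natCast]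
        simp
      rw [hx0, hcast,
        ih _ ((bn:Nat):Int) (by omega) (by positivity) (pvIntBit bn hbn2),
        pvRemB_unfold ((mn:Nat):Int) (by positivity) hc, hcast]
    · obtain ⟨mn, rfl⟩ := Int.eq_ofNat_of_zero_le hm
      obtain ⟨bn, rfl, hbn2⟩ : ∃ bn : Nat, b = (bn : Int) ∧ bn < 2 := by
        rcases hb with rfl | rfl
        · exact ⟨0, by simp, by omega⟩
        · exact ⟨1, by simp, by omega⟩
      exact pvRemB_step_small mn bn hbn2 (by omega)

theorem pvLfsr_fold {l : List Int} (h : pvIsBits l) :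
    l.foldl pvLfsrStep 0 = pvRemB (pvVal l) := by
  induction l using List.reverseRecOn with
  | nil => decide
  | append_singleton l' b ih =>
    have hl' : pvIsBits l' := fun z hz => h z (by simp [hz])
    rw [List.foldl_append, List.foldl_cons, List.foldl_nil, ih hl',
      pvVal_append_singleton,
      pvRemB_step (PySem.Int.bitLength (pvVal l')) (pvVal l') b le_rfl
        (pvVal_nonneg hl') (h b (by simp))]

theorem pvFoldChars (l : List Char) (r : Int) :
    l.foldl (fun r c => pvLfsrStep r (if c = '1' then 1 else 0)) r
      = (l.map (fun c => if c = '1' then (1:Int) else 0)).foldl pvLfsrStep r := by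
  induction l generalizing r with
  | nil => rfl
  | cons c t ih => simp [List.foldl_cons, ih]

-- ===== VERDICT proofs =====
theorem version_string_spec : Claim_equal_version_string := by
  intro version hdom hpre
  unfold Spec_version_string
  have hneg : ¬ version < 0 := not_lt.2 hpre
  simp only [version_string, version_string_alt]
  rw [show pvBinTail version = pvBinChars version.toNat from by rw [pvBinTail, if_neg hneg]]
  set n := version.toNat with hn
  set bc := pvBinChars n with hbc
  have hbcb := pvBinChars_bits n
  have hbcne := pvBinChars_ne_nil n
  set string := PySem.Chars.zfill bc 6 with hstring
  have hsdef : string = List.replicate ((6:Int).toNat - bc.length) '0' ++ bc :=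
    zfill_digits bc 6 hbcne hbcb
  have hsb : ∀ c ∈ string, c = '0' ∨ c = '1' := by
    intro c hcmem
    rw [hsdef] at hcmem
    rcases List.mem_append.1 hcmem with h | h
    · left; exact List.eq_of_mem_replicate h
    · exact hbcb c h
  have hsne : string ≠ [] := by
    rw [hsdef]
    intro hcon
    exact hbcne (List.append_eq_nil_iff.1 hcon).2
  have hsbits : pvIsBits (string.map pvDigit) := by
    intro z hz
    rcases List.mem_map.1 hz with ⟨c, hc, rfl⟩
    rcases hsb c hc with rfl | rfl
    · left; decide
    · right; decide
  -- the padded message list (A side)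
  have hrevne : string.reverse ≠ [] := by simpa using hsne
  have hrevb : ∀ c ∈ string.reverse, c = '0' ∨ c = '1' := fun c hcm => hsb c (List.mem_reverse.1 hcm)
  rw [zfill_digits string.reverse 18 hrevne hrevb]
  simp only [List.reverse_append, List.reverse_replicate, List.reverse_reverse,
    List.length_reverse, List.map_append, List.map_replicate,
    show pvDigit '0' = 0 from by decide]
  set m' := (18:Int).toNat - string.length with hm'
  set smap := string.map (fun c => pvDigit c) with hsmap
  have hsmap' : smap = string.map pvDigit := rfl
  have hmsgbits : pvIsBits (smap ++ List.replicate m' 0) := by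
    intro z hz
    rcases List.mem_append.1 hz with h | h
    · exact hsbits z h
    · left; exact List.eq_of_mem_replicate h
  set L0 := pvStripA (smap ++ List.replicate m' 0) with hL0
  have hL0bits : pvIsBits L0 := pvStripA_bits hmsgbits
  have hL0head := pvStripA_head hmsgbits
  -- B side: the shift register equals the A-side division value
  have hksh : (max 0 (18 - (string.length : Int))).toNat = m' := by
    rw [hm']
    omega
  rw [hksh, pvFoldChars]
  have hmapB : (string ++ List.replicate m' '0').map (fun c => if c = '1' then (1:Int) else 0)
      = smap ++ List.replicate m' 0 := by
    rw [List.map_append, List.map_replicate]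
    congr 1
    rw [hsmap]
    apply List.map_congr_left
    intro c hc
    rcases hsb c hc with rfl | rfl <;> decide
  rw [hmapB, pvLfsr_fold hmsgbits]
  have hvalL0 : pvVal (smap ++ List.replicate m' 0) = pvVal L0 := (pvStripA_val _).symm
  rw [hvalL0, pvRemB, pvBitLength_val hL0bits hL0head]
  obtain ⟨hrb, hrh, hrlen, hrval⟩ := pvLoop_corr L0.length L0 hL0bits hL0head (le_refl _)
  rw [← hrval]
  set r := pvDivLoopA L0.length L0 with hr
  apply congrArg String.ofList
  rw [← List.map_append, pvJoin_toChars (by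
      intro z hz
      rcases List.mem_append.1 hz with h | h
      · rw [List.mem_reverse, pvPadA_eq] at h
        rcases List.mem_append.1 h with h | h
        · left; exact List.eq_of_mem_replicate h
        · exact hrb z h
      · exact hsbits z (List.mem_reverse.1 h)), List.map_append]
  congr 1
  · rw [List.map_reverse, List.reverse_inj, pvPadA_eq, List.map_append, List.map_replicate,
      show pvChar 0 = '0' from by decide]
    rcases hrh with hrnil | hrh1
    · rw [hrnil, show (pvVal ([] : List Int)).toNat = 0 from by decide,
        show pvBinChars 0 = ['0'] from by rw [pvBinChars]; decide]
      decide
    · rw [pvBinChars_of_val hrb hrh1]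
      have hrne : r ≠ [] := by intro hcon; rw [hcon] at hrh1; simp at hrh1
      rw [zfill_digits (r.map pvChar) 12 (by simpa using hrne)
        (by intro c hc; rcases List.mem_map.1 hc with ⟨z, hz, rfl⟩; rw [pvChar]; split <;> simp)]
      rw [List.length_map]
      congr 1
  · rw [List.map_reverse, List.reverse_inj, hsmap', List.map_map]
    exact List.map_congr_left (fun c hc => pvChar_pvDigit (hsb c hc)) |>.trans (List.map_id _)
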